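-- pv_equiv track=rewrite | github.com/uycuhnt2467/Leetcode | array/795.py | helper
-- ===== SOURCE A (Python) =====
-- def helper(arr, max_):
--     i = 0
--     cum_ = 0
--     cur_total = 0
--     while i < len(arr):
--         if arr[i] <= max_:
--             cur_total += 1
--             cum_ += cur_total
--         else:
--             cur_total = 0
--         i+= 1
--     return cum_
-- ===== SOURCE B (Python) =====
-- def helper(arr, max_):
--     n = len(arr)
--     bad = [i for i, x in enumerate(arr) if x > max_]
--     invalid = 0
--     prev = -1
--     for b in bad:
--         invalid += (b - prev) * (n - b)
--         prev = b
--     return n * (n + 1) // 2 - invalid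
-- ===== Notes on version B (the rewrite author's own statement) =====
-- stated objective: alternative
-- what changed: B counts by complement: it collects the list of indices of elements > max_ and subtracts, from the total n*(n+1)//2 subarrays, the number of subarrays containing a bad element (summed over bad indices by leftmost bad element), instead of A's per-element running-count accumulation.
import Mathlib
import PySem

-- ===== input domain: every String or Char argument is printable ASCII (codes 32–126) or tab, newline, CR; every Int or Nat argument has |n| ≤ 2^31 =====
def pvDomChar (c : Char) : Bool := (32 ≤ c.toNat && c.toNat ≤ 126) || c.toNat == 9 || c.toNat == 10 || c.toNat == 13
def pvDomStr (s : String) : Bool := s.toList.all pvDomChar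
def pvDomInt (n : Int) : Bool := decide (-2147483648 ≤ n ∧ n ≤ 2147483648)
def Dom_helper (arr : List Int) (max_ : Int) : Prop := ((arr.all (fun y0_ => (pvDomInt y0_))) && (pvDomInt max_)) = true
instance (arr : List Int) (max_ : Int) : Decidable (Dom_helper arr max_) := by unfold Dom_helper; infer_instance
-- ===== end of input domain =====

-- B counts by complement: total subarrays n*(n+1)//2 minus subarrays containing an
-- element > max_, the latter summed over the list of "bad" indices (leftmost-bad
-- decomposition), instead of A's per-element running-count accumulation (objective: alternative).


-- ===== PORT A =====
-- A's while loop over indices, as structural recursion over the list with state (cum_, cur_total)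
def helperLoopA (max_ : Int) : List Int → Int → Int → Int
  | [], cum, _ => cum
  | a :: l, cum, cur =>
    if a ≤ max_ then helperLoopA max_ l (cum + (cur + 1)) (cur + 1)
    else helperLoopA max_ l cum 0

def helper (arr : List Int) (max_ : Int) : Int := helperLoopA max_ arr 0 0

-- ===== PORT B =====
-- bad = [i for i, x in enumerate(arr) if x > max_]
def badFrom (max_ : Int) (r : List Int) (s : Int) : List Int :=
  ((PySem.List.enumerate r s).filter (fun p => max_ < p.2)).map (fun p => p.1)

-- the body of B's 'for b in bad' loop, state (invalid, prev)
def foldStepB (n : Int) (s : Int × Int) (b : Int) : Int × Int := (s.1 + (b - s.2) * (n - b), b)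

def helper_alt (arr : List Int) (max_ : Int) : Int :=
  let n : Int := arr.length
  let bad := badFrom max_ arr 0
  let s := bad.foldl (foldStepB n) (0, -1)
  PySem.Int.floordiv (n * (n + 1)) 2 - s.1

-- ===== PRECONDITION & SPEC =====
def Spec_helper (arr : List Int) (max_ : Int) (out : Int) : Prop := out = helper_alt arr max_
instance (arr : List Int) (max_ : Int) (out : Int) : Decidable (Spec_helper arr max_ out) := by unfold Spec_helper; infer_instance

-- ===== CLAIM (what is proved, stated in full; the proofs are below) =====
def Claim_equal_helper : Prop := ∀ (arr : List Int) (max_ : Int), Dom_helper arr max_ → Spec_helper arr max_ (helper arr max_)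

-- ===== LEMMAS AND PROOFS =====

-- triangular number written as Python floor-div
def pvTri (r : Int) : Int := PySem.Int.floordiv (r * (r + 1)) 2

theorem pvTri_eval (r : Int) : ∃ k : Int, r * (r + 1) = 2 * k ∧ pvTri r = k := by
  rcases Int.even_mul_succ_self r with ⟨k, hk⟩
  refine ⟨k, by omega, ?_⟩
  unfold pvTri
  rw [show r * (r + 1) = 2 * k by omega,
      PySem.Int.floordiv_eq_ediv_of_pos (by norm_num : (0:Int) < 2)]
  omega

theorem pvTri_succ (r : Int) : pvTri (r + 1) = pvTri r + (r + 1) := by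
  rcases pvTri_eval r with ⟨k, hk, hr⟩
  rcases pvTri_eval (r + 1) with ⟨k', hk', hr'⟩
  rw [hr, hr']; nlinarith

theorem pvTri_zero : pvTri 0 = 0 := by
  rcases pvTri_eval 0 with ⟨k, hk, hr⟩; omega

-- split identity: tri (j + m + 1) = tri j + tri m + (j+1)(m+1)
theorem pvTri_split (j m : Int) : pvTri (j + m + 1) = pvTri j + pvTri m + (j + 1) * (m + 1) := by
  rcases pvTri_eval j with ⟨k1, h1, e1⟩
  rcases pvTri_eval m with ⟨k2, h2, e2⟩
  rcases pvTri_eval (j + m + 1) with ⟨k3, h3, e3⟩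
  rw [e1, e2, e3]; nlinarith

-- A's loop is additive in cum_
theorem loopA_add (max_ : Int) (l : List Int) :
    ∀ cum cur : Int, helperLoopA max_ l cum cur = cum + helperLoopA max_ l 0 cur := by
  induction l with
  | nil => intro cum cur; simp [helperLoopA]
  | cons a l ih =>
    intro cum cur
    by_cases h : a ≤ max_
    · simp only [helperLoopA, if_pos h]
      rw [ih (cum + (cur + 1)), ih (0 + (cur + 1))]; ring
    · simp only [helperLoopA, if_neg h]; exact ih cum 0

-- A's loop over an all-good prefix
theorem loopA_goods (max_ : Int) (g : List Int) (hg : ∀ x ∈ g, x ≤ max_) :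
    ∀ (t : List Int) (cum cur : Int),
      helperLoopA max_ (g ++ t) cum cur
        = helperLoopA max_ t (cum + ((g.length : Int) * cur + pvTri g.length)) (cur + g.length) := by
  induction g with
  | nil => intro t cum cur; simp [pvTri_zero]
  | cons a g ih =>
    intro t cum cur
    have ha : a ≤ max_ := hg a (by simp)
    have hg' : ∀ x ∈ g, x ≤ max_ := fun x hx => hg x (by simp [hx])
    simp only [List.cons_append, helperLoopA, if_pos ha]
    rw [ih hg' t (cum + (cur + 1)) (cur + 1)]
    have hc : ((g.length + 1 : Nat) : Int) = (g.length : Int) + 1 := by push_cast; ring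
    simp only [List.length_cons, hc]
    rw [pvTri_succ]
    congr 1 <;> ring

-- badFrom on a cons
theorem badFrom_cons (max_ x : Int) (r : List Int) (s : Int) :
    badFrom max_ (x :: r) s
      = (if max_ < x then [s] else []) ++ badFrom max_ r (s + 1) := by
  by_cases h : max_ < x <;> simp [badFrom, PySem.List.enumerate_cons, h]

-- badFrom over an append
theorem badFrom_append (max_ : Int) (l1 l2 : List Int) (s : Int) :
    badFrom max_ (l1 ++ l2) s = badFrom max_ l1 s ++ badFrom max_ l2 (s + l1.length) := by
  simp [badFrom, PySem.List.enumerate_append]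

-- badFrom of an all-good list is empty
theorem badFrom_goods (max_ : Int) (g : List Int) (hg : ∀ x ∈ g, x ≤ max_) :
    ∀ s, badFrom max_ g s = [] := by
  induction g with
  | nil => intro s; simp [badFrom, PySem.List.enumerate_nil]
  | cons a g ih =>
    intro s
    have ha : ¬ max_ < a := not_lt.mpr (hg a (by simp))
    rw [badFrom_cons, ih (fun x hx => hg x (by simp [hx])) (s + 1)]
    simp [ha]

-- shifting the start index shifts every bad index
theorem badFrom_shift (max_ : Int) (r : List Int) :
    ∀ s : Int, badFrom max_ r s = (badFrom max_ r 0).map (· + s) := by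
  induction r with
  | nil => intro s; simp [badFrom, PySem.List.enumerate_nil]
  | cons x r ih =>
    intro s
    rw [badFrom_cons, badFrom_cons, ih (s + 1), ih (0 + 1)]
    simp only [List.map_append, List.map_map]
    congr 1
    · by_cases h : max_ < x <;> simp [h]
    · apply List.map_congr_left; intro b _; simp; ring

-- B's fold is additive in the invalid accumulator
theorem foldB_add (n : Int) (bs : List Int) :
    ∀ i0 d p0 : Int,
      (bs.foldl (foldStepB n) (i0 + d, p0)).1 = d + (bs.foldl (foldStepB n) (i0, p0)).1 := by
  induction bs with
  | nil => intro i0 d p0; simp only [List.foldl_nil]; omega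
  | cons b bs ih =>
    intro i0 d p0
    simp only [List.foldl_cons, foldStepB]
    rw [show i0 + d + (b - p0) * (n - b) = (i0 + (b - p0) * (n - b)) + d by ring]
    exact ih _ d b

-- shifting all bad indices by k shifts n by k
theorem foldB_shift (n k : Int) (bs : List Int) :
    ∀ i0 p0 : Int,
      (bs.map (· + k)).foldl (foldStepB n) (i0, p0 + k)
        = ((bs.foldl (foldStepB (n - k)) (i0, p0)).1, (bs.foldl (foldStepB (n - k)) (i0, p0)).2 + k) := by
  induction bs with
  | nil => intro i0 p0; simp
  | cons b bs ih =>
    intro i0 p0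
    simp only [List.map_cons, List.foldl_cons, foldStepB]
    rw [show i0 + (b + k - (p0 + k)) * (n - (b + k)) = i0 + (b - p0) * (n - k - b) by ring]
    exact ih _ b

-- main equivalence, by strong induction on the length
theorem helper_eq (max_ : Int) : ∀ (N : Nat) (arr : List Int), arr.length ≤ N →
    helper arr max_ = helper_alt arr max_ := by
  intro N
  induction N with
  | zero =>
    intro arr h
    have : arr = [] := List.length_eq_zero_iff.mp (Nat.le_zero.mp h)
    subst this
    simp [helper, helperLoopA, helper_alt, badFrom, PySem.List.enumerate_nil]
  | succ N ih =>
    intro arr hlen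
    set p : Int → Bool := fun x => decide (x ≤ max_) with hp
    have hsplit : arr.takeWhile p ++ arr.dropWhile p = arr := List.takeWhile_append_dropWhile
    set g := arr.takeWhile p with hgdef
    have hg : ∀ x ∈ g, x ≤ max_ := by
      intro x hx
      have := List.mem_takeWhile_imp hx
      simpa [hp] using this
    cases hd : arr.dropWhile p with
    | nil =>
      -- all elements good
      have harr : arr = g := by rw [← hsplit, hd, List.append_nil]
      rw [harr]
      rw [show helper g max_ = helperLoopA max_ (g ++ []) 0 0 by simp [helper]]
      rw [loopA_goods max_ g hg]
      simp only [helperLoopA]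
      rw [helper_alt]
      rw [badFrom_goods max_ g hg 0]
      simp only [List.foldl_nil]
      unfold pvTri
      ring_nf
    | cons b r =>
      have harr : arr = g ++ b :: r := by rw [← hsplit, hd]
      have hb : max_ < b := by
        have hpb : p b = false := by
          have := List.head?_dropWhile_not p arr
          rw [hd] at this; simpa using this
        simpa [hp] using hpb
      have hrlen : r.length ≤ N := by
        have : arr.length = g.length + 1 + r.length := by
          rw [harr]; simp; omega
        omega
      -- A side
      have hA : helper arr max_ = pvTri g.length + helper r max_ := by
        rw [harr, helper, loopA_goods max_ g hg]
        simp only [helperLoopA, if_neg (not_le.mpr hb)]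
        rw [loopA_add]
        simp [helper]
      -- B side
      set j : Int := (g.length : Int) with hj
      set n : Int := (arr.length : Int) with hn
      have hnval : n = j + 1 + (r.length : Int) := by
        rw [hn, hj, harr]; simp; ring
      have hbad : badFrom max_ arr 0 = j :: (badFrom max_ r 0).map (· + (j + 1)) := by
        rw [harr, badFrom_append, badFrom_goods max_ g hg]
        rw [badFrom_cons]
        simp only [if_pos hb]
        rw [badFrom_shift max_ r (0 + (g.length : Int) + 1)]
        simp [hj]
      have hB : helper_alt arr max_ = pvTri j + helper_alt r max_ := by
        rw [helper_alt]
        simp only [← hn, hbad, List.foldl_cons]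
        have hstep : foldStepB n (0, -1) j = ((j + 1) * (n - j), -1 + (j + 1)) := by
          simp [foldStepB]
        rw [hstep, foldB_shift n (j + 1) (badFrom max_ r 0) ((j + 1) * (n - j)) (-1)]
        rw [show (j + 1) * (n - j) = 0 + (j + 1) * (n - j) by ring, foldB_add]
        rw [helper_alt]
        have hnk : n - (j + 1) = (r.length : Int) := by omega
        rw [hnk]
        have htri : PySem.Int.floordiv (n * (n + 1)) 2
            = pvTri j + PySem.Int.floordiv ((r.length : Int) * ((r.length : Int) + 1)) 2
              + (j + 1) * ((r.length : Int) + 1) := by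
          have h2 := pvTri_split j (r.length : Int)
          rw [show j + (r.length : Int) + 1 = n by omega] at h2
          simpa [pvTri] using h2
        rw [htri]
        have : (j + 1) * (n - j) = (j + 1) * ((r.length : Int) + 1) := by rw [hnval]; ring
        rw [this]; ring
      rw [hA, hB, ih r hrlen, hj]

-- ===== VERDICT (by name: the statement is the Claim_ definition above) =====
theorem helper_spec : Claim_equal_helper := by
  intro arr max_ _
  unfold Spec_helper
  exact helper_eq max_ arr.length arr le_rfl
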